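-- pv_equiv track=rewrite | github.com/ttup7777/Information-Retrieval | code.py | Paragraph_Rocchio
-- ===== SOURCE A (Python) =====
-- def Paragraph_Rocchio(section_heading, article_paragraphs):
--     heading_pid={}
--     for h in section_heading:
--         if "/" not in h:
--             continue
--         index_heading=h.split("/")[len(h.split("/"))-1]
--         candidate_paragraph=[]
--         for other_h in section_heading:
--             if "/" not in other_h:
--                 continue
--             if (index_heading in [i for i in other_h.split("/")]) & (other_h!=h):
--                 page_id=other_h.split("/")[0]
--                 candidate_paragraph.extend(article_paragraphs[page_id])
--         if len(candidate_paragraph)>0: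
--             heading_pid[h]=candidate_paragraph
--     return heading_pid
-- ===== SOURCE B (Python) =====
-- def Paragraph_Rocchio(section_heading, article_paragraphs):
--     # Index contributors once: segment -> ordered list of headings containing that segment.
--     by_seg = {}
--     for other_h in section_heading:
--         if "/" in other_h:
--             for seg in dict.fromkeys(other_h.split("/")):
--                 by_seg.setdefault(seg, []).append(other_h)
--     seen = set()
--     result = {}
--     for h in section_heading:
--         if "/" not in h or h in seen:
--             continue
--         seen.add(h)
--         candidate = []
--         for other_h in by_seg.get(h.split("/")[-1], []):
--             if other_h != h:
--                 candidate.extend(article_paragraphs[other_h.split("/")[0]])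
--         if candidate:
--             result[h] = candidate
--     return result
-- ===== Notes on version B (the rewrite author's own statement) =====
-- stated objective: alternative
-- what changed: A rescans the whole heading list for every heading (nested gather); B builds a segment-to-contributors index once and then gathers each distinct heading's candidates from its own bucket only, skipping duplicate headings instead of recomputing and overwriting.
import Mathlib
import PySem

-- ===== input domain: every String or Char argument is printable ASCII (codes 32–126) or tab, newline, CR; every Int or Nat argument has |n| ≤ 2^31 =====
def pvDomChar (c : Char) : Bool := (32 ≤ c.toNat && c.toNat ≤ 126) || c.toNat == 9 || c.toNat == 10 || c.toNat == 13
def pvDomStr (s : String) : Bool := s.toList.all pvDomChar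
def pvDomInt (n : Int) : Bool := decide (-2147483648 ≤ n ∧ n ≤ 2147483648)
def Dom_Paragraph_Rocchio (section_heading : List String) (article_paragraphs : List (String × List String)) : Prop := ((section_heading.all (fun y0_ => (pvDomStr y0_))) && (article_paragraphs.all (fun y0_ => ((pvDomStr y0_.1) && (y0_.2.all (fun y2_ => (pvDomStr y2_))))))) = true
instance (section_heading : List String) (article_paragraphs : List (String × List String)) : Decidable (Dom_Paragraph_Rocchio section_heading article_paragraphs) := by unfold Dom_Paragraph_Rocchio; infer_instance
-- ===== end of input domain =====

-- B replaces A's nested gather (for every heading, rescan all headings for matching segments) by a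
-- segment→contributors index built once, then one indexed gather per distinct heading from its own bucket
-- (objective: alternative algorithm; identical return value).

-- shared primitives (both Pythons call `h.split("/")`, `"/" in h`, `article_paragraphs[pid]`)
def pvSegs (s : String) : List String := (PySem.Str.split? s "/").getD []   -- sep "/" ≠ "", so split? is `some …`: exact
def pvSlash (s : String) : Bool := PySem.Str.isIn "/" s
-- A's `h.split("/")[len(h.split("/"))-1]`
def pvLastA (s : String) : String := PySem.List.pyGetD (pvSegs s) (((pvSegs s).length : Int) - 1) ""
-- `article_paragraphs[other_h.split("/")[0]]`; total via getD, exact under Pre_ (key present)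
def pvPage (ap : List (String × List String)) (oh : String) : List String :=
  (PySem.Dict.mk ap).getD (PySem.List.pyGetD (pvSegs oh) 0 "") []

-- ===== PORT A =====
-- inner loop of A: candidate_paragraph accumulation over all other_h
def pvInnerA (H : List String) (ap : List (String × List String)) (h : String) : List String :=
  H.foldl (fun acc oh =>
    if pvSlash oh = false then acc
    else if (decide (pvLastA h ∈ pvSegs oh) && decide (oh ≠ h)) then acc ++ pvPage ap oh
    else acc) []

def pvStepA (H : List String) (ap : List (String × List String))
    (d : PySem.Dict String (List String)) (h : String) : PySem.Dict String (List String) :=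
  if pvSlash h = false then d
  else
    let cand := pvInnerA H ap h
    if cand.length > 0 then d.insert h cand else d

def Paragraph_Rocchio (section_heading : List String) (article_paragraphs : List (String × List String)) : List (String × List String) :=
  (section_heading.foldl (pvStepA section_heading article_paragraphs) (PySem.Dict.mk [])).items

-- ===== PORT B =====
-- index build: for each heading with "/", append it to the bucket of each of its distinct segments
def pvBySeg (H : List String) : PySem.Dict String (List String) :=
  H.foldl (fun d oh =>
    if pvSlash oh then
      (PySem.List.dedup (pvSegs oh)).foldl (fun d seg => d.modify seg [] (· ++ [oh])) d
    else d) (PySem.Dict.mk [])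

-- gather for one heading, scanning only its own bucket
def pvInnerB (bySeg : PySem.Dict String (List String)) (ap : List (String × List String)) (h : String) : List String :=
  (bySeg.getD (PySem.List.pyGetD (pvSegs h) (-1) "") []).foldl
    (fun acc oh => if oh ≠ h then acc ++ pvPage ap oh else acc) []

def pvStepB (bySeg : PySem.Dict String (List String)) (ap : List (String × List String))
    (st : PySem.Set String × PySem.Dict String (List String)) (h : String) :
    PySem.Set String × PySem.Dict String (List String) :=
  if !pvSlash h || PySem.Set.contains st.1 h then st
  else
    let cand := pvInnerB bySeg ap h
    (PySem.Set.add st.1 h, if cand.isEmpty then st.2 else st.2.insert h cand)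

def Paragraph_Rocchio_alt (section_heading : List String) (article_paragraphs : List (String × List String)) : List (String × List String) :=
  (section_heading.foldl (pvStepB (pvBySeg section_heading) article_paragraphs)
    (PySem.Set.empty, PySem.Dict.mk [])).2.items

-- ===== PRECONDITION & SPEC =====
-- Pre_ excludes exactly the inputs on which the Python A raises KeyError: some contributing heading's
-- page id (its first path segment) is missing from article_paragraphs.  B raises there too.
def Pre_Paragraph_Rocchio (section_heading : List String) (article_paragraphs : List (String × List String)) : Prop :=
  ∀ h ∈ section_heading, ∀ oh ∈ section_heading,
    pvSlash h = true → pvSlash oh = true → pvLastA h ∈ pvSegs oh → oh ≠ h →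
    (PySem.Dict.mk article_paragraphs).contains (PySem.List.pyGetD (pvSegs oh) 0 "") = true
instance (section_heading : List String) (article_paragraphs : List (String × List String)) : Decidable (Pre_Paragraph_Rocchio section_heading article_paragraphs) := by unfold Pre_Paragraph_Rocchio; infer_instance

def pvWitness_Paragraph_Rocchio : List String × (List (String × List String)) :=
  (["a/b", "b/a"], [("a", ["p1"]), ("b", ["p2"])])

def Spec_Paragraph_Rocchio (section_heading : List String) (article_paragraphs : List (String × List String)) (out : List (String × List String)) : Prop := out = Paragraph_Rocchio_alt section_heading article_paragraphs
instance (section_heading : List String) (article_paragraphs : List (String × List String)) (out : List (String × List String)) : Decidable (Spec_Paragraph_Rocchio section_heading article_paragraphs out) := by unfold Spec_Paragraph_Rocchio; infer_instance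

-- ===== CLAIM (what is proved, stated in full; the proofs are below) =====
def Claim_equal_Paragraph_Rocchio : Prop := ∀ (section_heading : List String) (article_paragraphs : List (String × List String)), Dom_Paragraph_Rocchio section_heading article_paragraphs → Pre_Paragraph_Rocchio section_heading article_paragraphs → Spec_Paragraph_Rocchio section_heading article_paragraphs (Paragraph_Rocchio section_heading article_paragraphs)

-- ===== LEMMAS AND PROOFS =====

theorem pv_go_ne_nil (sep : List Char) (fuel : Nat) (l cur : List Char) (acc : List (List Char)) :
    PySem.Chars.splitOn.go sep fuel l cur acc ≠ [] := by
  induction fuel generalizing l cur acc with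
  | zero => simp [PySem.Chars.splitOn.go]
  | succ n ih =>
    cases l with
    | nil => simp [PySem.Chars.splitOn.go]
    | cons c rest =>
      rw [PySem.Chars.splitOn.go]
      split
      · exact ih _ _ _
      · exact ih _ _ _

theorem pvSegs_ne_nil (s : String) : pvSegs s ≠ [] := by
  simp [pvSegs, PySem.Str.split?, PySem.Chars.split?]
  exact pv_go_ne_nil _ _ _ _ _

-- B's parts[-1] is A's parts[len(parts)-1]
theorem pv_last_eq (s : String) : PySem.List.pyGetD (pvSegs s) (-1) "" = pvLastA s := by
  unfold pvLastA
  have h : pvSegs s ≠ [] := pvSegs_ne_nil s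
  have hl : 1 ≤ (pvSegs s).length := List.length_pos_iff.mpr h
  rw [PySem.List.pyGetD_neg_ofNat (pvSegs s) 1 "" (by omega) hl]
  have : (((pvSegs s).length : Int) - 1) = (((pvSegs s).length - 1 : Nat) : Int) := by omega
  rw [this, PySem.List.pyGetD_natCast]
  rw [List.getD_eq_getElem _ _ (by omega)]

-- the common normal form of the candidate list of a heading h
def pvCand (H : List String) (ap : List (String × List String)) (h : String) : List String :=
  H.flatMap (fun oh =>
    if (pvSlash oh && decide (pvLastA h ∈ pvSegs oh) && decide (oh ≠ h)) then pvPage ap oh else [])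

def pvGood (H : List String) (ap : List (String × List String)) (h : String) : Bool :=
  pvSlash h && !(pvCand H ap h).isEmpty

theorem pv_candA_eq (H : List String) (ap : List (String × List String)) (h : String) :
    pvInnerA H ap h = pvCand H ap h := by
  unfold pvInnerA pvCand
  rw [PySem.List.foldl_congr_mem _ _
    (fun acc oh => acc ++ (if (pvSlash oh && decide (pvLastA h ∈ pvSegs oh) && decide (oh ≠ h)) then pvPage ap oh else [])) _ ?_]
  · rw [PySem.List.foldl_append_eq_flatMap]
    simp
  · intro acc x _
    by_cases h1 : pvSlash x = false
    · simp [h1]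
    · simp only [h1, if_false]
      rw [Bool.not_eq_false] at h1
      by_cases h2 : (decide (pvLastA h ∈ pvSegs x) && decide (x ≠ h)) = true
      · by_cases hm : pvLastA h ∈ pvSegs x <;> by_cases hn : x = h <;> simp_all
      · simp only [Bool.and_eq_true, decide_eq_true_eq, Bool.and_eq_false_iff, decide_eq_false_iff_not] at h2
        by_cases hm : pvLastA h ∈ pvSegs x <;> by_cases hn : x = h <;> simp_all

theorem pv_foldl_mod (x : String) (l : List String) (d : PySem.Dict String (List String)) :
    l.foldl (fun d seg => d.modify seg [] (· ++ [x])) d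
      = (l.map (fun s => (s, x))).foldl (fun d p => d.modify p.1 [] (· ++ [p.2])) d := by
  rw [List.foldl_map]

theorem pv_bySeg_getD (H : List String) (seg : String) :
    (pvBySeg H).getD seg [] = H.filter (fun oh => pvSlash oh && decide (seg ∈ pvSegs oh)) := by
  unfold pvBySeg
  induction H using List.reverseRecOn with
  | nil => simp [PySem.Dict.getD, PySem.Dict.get?]
  | append_singleton K x ih =>
    rw [List.foldl_append, List.foldl_cons, List.foldl_nil, List.filter_append]
    by_cases hx : pvSlash x = true
    · simp only [hx, if_true]
      rw [pv_foldl_mod]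
      rw [PySem.Dict.getD_foldl_modify_append]
      rw [ih]
      congr 1
      · -- the new contribution
        rw [List.filter_map]
        rw [show ((fun p : String × String => p.1 == seg) ∘ (fun s : String => (s, x)))
              = (fun s : String => s == seg) from rfl]
        rw [List.filter_beq, List.Nodup.count (PySem.List.nodup_dedup _)]
        by_cases hm : seg ∈ pvSegs x
        · simp [PySem.List.mem_dedup, hm, hx]
        · simp [PySem.List.mem_dedup, hm]
    · simp only [hx]
      simp only [Bool.false_eq_true, if_false] at *
      rw [ih]
      have : pvSlash x = false := by revert hx; cases pvSlash x <;> simp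
      simp [this]

theorem pv_flatMap_filter {α β : Type} (p : α → Bool) (g : α → List β) (l : List α) :
    (l.filter p).flatMap g = l.flatMap (fun x => if p x then g x else []) := by
  induction l with
  | nil => rfl
  | cons a t ih =>
    by_cases ha : p a
    · simp [List.filter_cons, ha, ih]
    · simp only [Bool.not_eq_true] at ha
      simp [List.filter_cons, ha, ih]

theorem pv_candB_eq (H : List String) (ap : List (String × List String)) (h : String) :
    pvInnerB (pvBySeg H) ap h = pvCand H ap h := by
  unfold pvInnerB pvCand
  rw [pv_last_eq, pv_bySeg_getD]
  rw [PySem.List.foldl_congr_mem _ _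
    (fun acc oh => acc ++ (if oh ≠ h then pvPage ap oh else [])) _ ?_]
  · rw [PySem.List.foldl_append_eq_flatMap, List.nil_append, pv_flatMap_filter]
    congr 1
    funext oh
    by_cases h1 : pvSlash oh <;> by_cases h2 : pvLastA h ∈ pvSegs oh <;> by_cases h3 : oh = h <;>
      simp [h1, h2, h3]
  · intro acc x _
    by_cases hx : x = h <;> simp [hx]

theorem pv_dedup_snoc (l : List String) (x : String) :
    PySem.List.dedup (l ++ [x]) = if x ∈ l then PySem.List.dedup l else PySem.List.dedup l ++ [x] := by
  simp only [PySem.List.dedup_eq_ofList, PySem.Set.ofList_eq_foldl, List.foldl_append, List.foldl]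
  by_cases hx : x ∈ l
  · have : PySem.Set.contains (List.foldl PySem.Set.add [] l) x = true := by
      rw [PySem.Set.contains_iff, ← PySem.Set.ofList_eq_foldl, PySem.Set.mem_ofList]; exact hx
    simp only [PySem.Set.add, this, if_true, if_pos hx]
  · have : PySem.Set.contains (List.foldl PySem.Set.add [] l) x = false := by
      rw [Bool.eq_false_iff, Ne, PySem.Set.contains_iff, ← PySem.Set.ofList_eq_foldl, PySem.Set.mem_ofList]
      exact hx
    simp only [PySem.Set.add, this, Bool.false_eq_true, if_false, if_neg hx]

theorem pv_A_items (H : List String) (ap : List (String × List String)) (K : List String) :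
    (K.foldl (pvStepA H ap) (PySem.Dict.mk [])).items
      = (PySem.List.dedup (K.filter (pvGood H ap))).map (fun h => (h, pvCand H ap h)) := by
  induction K using List.reverseRecOn with
  | nil => simp [PySem.List.dedup]
  | append_singleton K x ih =>
    rw [List.foldl_append, List.foldl_cons, List.foldl_nil, List.filter_append]
    set d := List.foldl (pvStepA H ap) (PySem.Dict.mk []) K with hd
    have hkeys : d.keys
        = PySem.List.dedup (K.filter (pvGood H ap)) := by
      show d.items.map Prod.fst = _
      rw [ih, List.map_map]
      simp [Function.comp_def]
    have hcont : d.contains x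
        = decide (x ∈ K.filter (pvGood H ap)) := by
      rw [PySem.Dict.contains_eq_decide_mem_keys, hkeys]
      simp [PySem.List.mem_dedup]
    unfold pvStepA
    by_cases hx : pvSlash x = false
    · have : pvGood H ap x = false := by simp [pvGood, hx]
      simp [hx, this, ih]
    · rw [Bool.not_eq_false] at hx
      rw [if_neg (by simp [hx]), pv_candA_eq]
      by_cases hc : (pvCand H ap x).length > 0
      · have hne : pvCand H ap x ≠ [] := List.length_pos_iff.mp hc
        have hgood : pvGood H ap x = true := by simp [pvGood, hx, hne]
        rw [if_pos hc, List.filter_cons, List.filter_nil]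
        simp only [hgood, if_true]
        by_cases hmem : x ∈ K.filter (pvGood H ap)
        · have hcont' : d.contains x = true := by
            rw [hcont]; simpa using hmem
          rw [PySem.Dict.items_insert_of_contains _ _ hcont', ih]
          rw [pv_dedup_snoc, if_pos hmem, List.map_map]
          apply List.map_congr_left
          intro a _
          by_cases hax : a = x <;> simp [hax]
        · have hcont' : d.contains x = false := by
            rw [hcont]; simpa using hmem
          rw [PySem.Dict.items_insert_of_not_contains _ _ hcont', ih]
          rw [pv_dedup_snoc, if_neg hmem, List.map_append]
          simp
      · have he : pvCand H ap x = [] := by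
          have : (pvCand H ap x).length = 0 := by omega
          exact List.eq_nil_of_length_eq_zero this
        have hgood : pvGood H ap x = false := by simp [pvGood, he]
        rw [if_neg hc, List.filter_cons, List.filter_nil]
        simp [hgood, ih]

theorem pv_ofList_snoc {α : Type} [BEq α] (l : List α) (x : α) :
    PySem.Set.ofList (l ++ [x]) = PySem.Set.add (PySem.Set.ofList l) x := by
  rw [PySem.Set.ofList_eq_foldl, PySem.Set.ofList_eq_foldl, List.foldl_append, List.foldl_cons,
    List.foldl_nil]

theorem pv_B_state (H : List String) (ap : List (String × List String)) (K : List String) :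
    (K.foldl (pvStepB (pvBySeg H) ap) (PySem.Set.empty, PySem.Dict.mk [])).1
        = PySem.Set.ofList (K.filter pvSlash)
    ∧ (K.foldl (pvStepB (pvBySeg H) ap) (PySem.Set.empty, PySem.Dict.mk [])).2.items
        = (PySem.List.dedup (K.filter (pvGood H ap))).map (fun h => (h, pvCand H ap h)) := by
  induction K using List.reverseRecOn with
  | nil => constructor <;> simp [PySem.Set.empty, PySem.Set.ofList, PySem.List.dedup]
  | append_singleton K x ih =>
    obtain ⟨ih1, ih2⟩ := ih
    rw [List.foldl_append, List.foldl_cons, List.foldl_nil, List.filter_append, List.filter_append]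
    set st := List.foldl (pvStepB (pvBySeg H) ap) (PySem.Set.empty, PySem.Dict.mk []) K with hst
    have hcont1 : PySem.Set.contains st.1 x = decide (x ∈ K.filter pvSlash) := by
      rw [ih1]
      by_cases hm : x ∈ K.filter pvSlash
      · simp only [hm, decide_true]
        rw [PySem.Set.contains_iff, PySem.Set.mem_ofList]
        exact hm
      · simp only [hm, decide_false]
        rw [Bool.eq_false_iff, Ne, PySem.Set.contains_iff, PySem.Set.mem_ofList]
        exact hm
    have hkeys : st.2.keys = PySem.List.dedup (K.filter (pvGood H ap)) := by
      show st.2.items.map Prod.fst = _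
      rw [ih2, List.map_map]
      simp [Function.comp_def]
    have hcont2 : st.2.contains x = decide (x ∈ K.filter (pvGood H ap)) := by
      rw [PySem.Dict.contains_eq_decide_mem_keys, hkeys]
      simp [PySem.List.mem_dedup]
    unfold pvStepB
    by_cases hx : pvSlash x = true
    · by_cases hseen : x ∈ K.filter pvSlash
      · have hc1 : PySem.Set.contains st.1 x = true := by rw [hcont1]; simpa using hseen
        rw [if_pos (by rw [Bool.or_eq_true]; exact Or.inr hc1)]
        have hxK : x ∈ K := (List.mem_filter.mp hseen).1
        constructor
        · rw [ih1, List.filter_cons, List.filter_nil]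
          simp only [hx, if_true]
          rw [pv_ofList_snoc]
          have hcc : PySem.Set.contains (PySem.Set.ofList (K.filter pvSlash)) x = true := by
            rw [PySem.Set.contains_iff, PySem.Set.mem_ofList]; exact hseen
          simp only [PySem.Set.add, hcc, if_true]
        · rw [ih2, List.filter_cons, List.filter_nil]
          by_cases hg : pvGood H ap x = true
          · simp only [hg, if_true]
            rw [pv_dedup_snoc, if_pos (List.mem_filter.mpr ⟨hxK, hg⟩)]
          · rw [Bool.not_eq_true] at hg
            simp [hg]
      · have hxK : x ∉ K := fun hk => hseen (List.mem_filter.mpr ⟨hk, hx⟩)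
        have hc1 : PySem.Set.contains st.1 x = false := by rw [hcont1]; simpa using hseen
        have hguard : ¬ ((!pvSlash x || PySem.Set.contains st.1 x) = true) := by
          rw [Bool.or_eq_true]
          rintro (h | h)
          · rw [hx] at h; simp at h
          · rw [hc1] at h; exact absurd h (by simp)
        rw [if_neg hguard]
        rw [pv_candB_eq]
        have hc2 : st.2.contains x = false := by
          rw [hcont2]
          simp only [decide_eq_false_iff_not, List.mem_filter]
          exact fun h => hxK h.1
        constructor
        · show PySem.Set.add st.1 x = _
          rw [ih1, List.filter_cons, List.filter_nil]
          simp only [hx, if_true]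
          rw [pv_ofList_snoc]
        · show (if (pvCand H ap x).isEmpty then st.2 else st.2.insert x (pvCand H ap x)).items = _
          rw [List.filter_cons, List.filter_nil]
          by_cases hemp : (pvCand H ap x).isEmpty = true
          · have hg : pvGood H ap x = false := by simp [pvGood, hemp]
            simp only [hemp, if_true, hg, if_false, ih2]
            simp
          · have hg : pvGood H ap x = true := by
              simp only [pvGood, hx, Bool.true_and, Bool.not_eq_eq_eq_not, Bool.not_false]
              simpa using hemp
            rw [if_neg hemp]
            simp only [hg, if_true]
            rw [PySem.Dict.items_insert_of_not_contains _ _ hc2, ih2]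
            rw [pv_dedup_snoc, if_neg (fun hm => hxK (List.mem_filter.mp hm).1), List.map_append]
            simp
    · rw [Bool.not_eq_true] at hx
      rw [if_pos (by rw [Bool.or_eq_true]; left; rw [hx]; rfl)]
      have hg : pvGood H ap x = false := by simp [pvGood, hx]
      constructor
      · rw [ih1, List.filter_cons, List.filter_nil]
        simp [hx]
      · rw [ih2, List.filter_cons, List.filter_nil]
        simp [hg]

theorem Paragraph_Rocchio_spec : Claim_equal_Paragraph_Rocchio := by
  intro H ap _ _
  unfold Spec_Paragraph_Rocchio Paragraph_Rocchio Paragraph_Rocchio_alt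
  rw [pv_A_items H ap H, (pv_B_state H ap H).2]
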